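-- pv_equiv track=rewrite | github.com/runport-io/ipfeb22 | link_manager.py | get_repeats
-- ===== SOURCE A (Python) =====
-- def get_repeats(urls, starting=1):
--     result = list()
--     i_to_url = dict()
--     url_to_i = dict()
--     # index to url
--
--     i = starting
--
--     for url in urls:
--         if url not in url_to_i:
--             url_to_i[url] = i
--             j = i
--             i += 1
--         else:
--             j = url_to_i[url]
--
--         result.append(j)
--         i_to_url[j] = url
--
--     return result, i_to_url
-- ===== SOURCE B (Python) =====
-- def get_repeats(urls, starting=1):
--     # Build the url -> index table first, then derive both outputs from it.
--     url_to_i = {}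
--     i = starting
--     for url in urls:
--         if url not in url_to_i:
--             url_to_i[url] = i
--             i += 1
--     result = [url_to_i[url] for url in urls]
--     i_to_url = {i: url for url, i in url_to_i.items()}
--     return result, i_to_url
-- ===== Notes on version B (the rewrite author's own statement) =====
-- stated objective: simpler
-- what changed: A fuses everything into one loop carrying four pieces of state; B builds only the url->index table in the loop, then derives result by a single mapping pass and i_to_url by inverting the table.
import Mathlib
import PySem

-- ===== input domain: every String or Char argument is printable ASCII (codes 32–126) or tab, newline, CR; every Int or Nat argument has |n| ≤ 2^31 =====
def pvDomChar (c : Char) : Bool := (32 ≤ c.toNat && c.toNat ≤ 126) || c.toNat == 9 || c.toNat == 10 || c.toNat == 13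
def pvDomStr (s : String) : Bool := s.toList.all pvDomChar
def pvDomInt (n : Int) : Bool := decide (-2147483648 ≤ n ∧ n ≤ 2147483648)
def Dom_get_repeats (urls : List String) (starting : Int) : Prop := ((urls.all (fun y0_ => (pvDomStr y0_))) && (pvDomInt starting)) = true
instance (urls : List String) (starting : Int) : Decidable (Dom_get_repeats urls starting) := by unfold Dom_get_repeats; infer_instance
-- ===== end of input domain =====

-- B restructures A's single fused loop (four pieces of state) into: build the url->index
-- table, then one mapping pass for `result` and an inversion pass for `i_to_url` (objective: simpler).

-- ===== PORT A =====
-- one loop iteration of A: state = (result, i_to_url, url_to_i, i)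
def stepA (st : List Int × PySem.Dict Int String × PySem.Dict String Int × Int) (url : String) :
    List Int × PySem.Dict Int String × PySem.Dict String Int × Int :=
  let result := st.1
  let i_to_url := st.2.1
  let url_to_i := st.2.2.1
  let i := st.2.2.2
  if url_to_i.contains url = false then
    -- url not in url_to_i: url_to_i[url] = i; j = i; i += 1
    (result ++ [i], i_to_url.insert i url, url_to_i.insert url i, i + 1)
  else
    -- j = url_to_i[url]  (key present, so getD is exact)
    let j := url_to_i.getD url 0
    (result ++ [j], i_to_url.insert j url, url_to_i, i)

def get_repeats (urls : List String) (starting : Int) : List Int × (List (Int × String)) :=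
  let st := urls.foldl stepA ([], PySem.Dict.empty, PySem.Dict.empty, starting)
  (st.1, st.2.1.items)

-- ===== PORT B =====
-- one loop iteration of B's first loop: state = (url_to_i, i)
def stepB (st : PySem.Dict String Int × Int) (url : String) : PySem.Dict String Int × Int :=
  if st.1.contains url = false then (st.1.insert url st.2, st.2 + 1) else st

def get_repeats_alt (urls : List String) (starting : Int) : List Int × (List (Int × String)) :=
  let p := urls.foldl stepB (PySem.Dict.empty, starting)
  let url_to_i := p.1
  -- url_to_i[url]: every url of the list is a key of url_to_i, so getD is exact
  let result := urls.map (fun url => url_to_i.getD url 0)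
  let i_to_url := url_to_i.items.foldl (fun d kv => d.insert kv.2 kv.1) PySem.Dict.empty
  (result, i_to_url.items)

-- ===== PRECONDITION & SPEC =====
def Spec_get_repeats (urls : List String) (starting : Int) (out : List Int × (List (Int × String))) : Prop := out = get_repeats_alt urls starting
instance (urls : List String) (starting : Int) (out : List Int × (List (Int × String))) : Decidable (Spec_get_repeats urls starting out) := by unfold Spec_get_repeats; infer_instance

-- ===== CLAIM (what is proved, stated in full; the proofs are below) =====
def Claim_equal_get_repeats : Prop := ∀ (urls : List String) (starting : Int), Dom_get_repeats urls starting → Spec_get_repeats urls starting (get_repeats urls starting)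

-- ===== LEMMAS AND PROOFS =====

-- the inverted dict Dict.mk form of A's i_to_url
def invD (d : PySem.Dict String Int) : PySem.Dict Int String :=
  PySem.Dict.mk (d.items.map (fun kv => (kv.2, kv.1)))

-- a key already present keeps its value through B's first loop
lemma stB_get?_stable : ∀ (l : List String) (st : PySem.Dict String Int × Int) (u : String) (j : Int),
    st.1.get? u = some j → (l.foldl stepB st).1.get? u = some j := by
  intro l
  induction l with
  | nil => intro st u j h; simpa using h
  | cons x l ih =>
    intro st u j h
    simp only [List.foldl_cons]
    apply ih
    unfold stepB
    by_cases hc : st.1.contains x = false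
    · simp only [hc, if_true]
      have hne : u ≠ x := by
        intro he; subst he
        rw [PySem.Dict.contains_eq_isSome_get?, h] at hc
        simp at hc
      rw [PySem.Dict.get?_insert_of_ne _ _ hne]
      exact h
    · simp only [hc]; exact h

-- the inverted dict: inserting a fresh index appends
lemma invD_insert_fresh (u2i : PySem.Dict String Int) (u : String) (i : Int)
    (hc : u2i.contains u = false) (hlt : ∀ v ∈ u2i.values, v < i) :
    (invD u2i).insert i u = invD (u2i.insert u i) := by
  apply PySem.Dict.ext
  have hci : (invD u2i).contains i = false := by
    rw [PySem.Dict.contains_eq_decide_mem_keys]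
    simp only [invD, PySem.Dict.keys_mk, List.map_map, decide_eq_false_iff_not]
    intro hmem
    simp only [List.mem_map, Function.comp] at hmem
    obtain ⟨kv, hkv, hev⟩ := hmem
    have := hlt kv.2 (by simp only [PySem.Dict.values]; exact List.mem_map_of_mem hkv)
    omega
  have hitems : (u2i.insert u i).items = u2i.items ++ [(u, i)] :=
    PySem.Dict.items_insert_of_not_contains _ _ hc
  rw [PySem.Dict.items_insert_of_not_contains _ _ hci]
  simp [invD, hitems]

-- the inverted dict: re-inserting an existing (index, url) pair is the identity
lemma invD_insert_mem (u2i : PySem.Dict String Int) (u : String) (j : Int)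
    (hv : u2i.values.Nodup) (hj : (u, j) ∈ u2i.items) :
    (invD u2i).insert j u = invD u2i := by
  apply PySem.Dict.ext
  have hvn : (u2i.items.map (fun kv => kv.2)).Nodup := by
    simpa only [PySem.Dict.values] using hv
  have hcj : (invD u2i).contains j = true := by
    rw [PySem.Dict.contains_eq_decide_mem_keys]
    simp only [invD, PySem.Dict.keys_mk, List.map_map, decide_eq_true_eq]
    exact List.mem_map.mpr ⟨(u, j), hj, rfl⟩
  rw [PySem.Dict.items_insert_of_contains _ _ hcj]
  have hid : ∀ p ∈ (invD u2i).items, (if (p.1 == j) = true then (j, u) else p) = p := by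
    intro p hp
    simp only [invD] at hp
    obtain ⟨kv, hkv, hev⟩ := List.mem_map.mp hp
    by_cases hpj : (p.1 == j) = true
    · simp only [hpj, if_true]
      have hj2 : kv.2 = j := by
        have : p.1 = j := by simpa using hpj
        rw [← hev] at this; exact this
      have : kv = (u, j) := List.inj_on_of_nodup_map hvn hkv hj (by simpa using hj2)
      rw [← hev, this]
    · simp [hpj]
  calc ((invD u2i).items.map (fun p => if (p.1 == j) = true then (j, u) else p))
      = (invD u2i).items.map id := List.map_congr_left hid
    _ = (invD u2i).items := List.map_id _

-- B's first loop preserves the dictionary invariants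
lemma stB_inv : ∀ (l : List String) (u2i : PySem.Dict String Int) (i : Int),
    u2i.keys.Nodup → u2i.values.Nodup → (∀ v ∈ u2i.values, v < i) →
    (l.foldl stepB (u2i, i)).1.keys.Nodup ∧ (l.foldl stepB (u2i, i)).1.values.Nodup ∧
      (∀ v ∈ (l.foldl stepB (u2i, i)).1.values, v < (l.foldl stepB (u2i, i)).2) := by
  intro l
  induction l with
  | nil => intro u2i i hk hv hlt; exact ⟨hk, hv, hlt⟩
  | cons u l ih =>
    intro u2i i hk hv hlt
    simp only [List.foldl_cons]
    by_cases hc : u2i.contains u = false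
    · have hst : stepB (u2i, i) u = (u2i.insert u i, i + 1) := by simp [stepB, hc]
      rw [hst]
      have hvals : (u2i.insert u i).values = u2i.values ++ [i] := by
        simp only [PySem.Dict.values, PySem.Dict.items_insert_of_not_contains _ _ hc,
          List.map_append, List.map_cons, List.map_nil]
      refine ih _ _ (PySem.Dict.nodup_keys_insert _ _ _ hk) ?_ ?_
      · rw [hvals]
        refine List.Nodup.append hv (List.nodup_singleton i) ?_
        intro a ha hb
        simp only [List.mem_singleton] at hb
        have := hlt a ha; omega
      · intro v hvv
        rw [hvals] at hvv
        rcases List.mem_append.mp hvv with h | h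
        · have := hlt v h; omega
        · simp only [List.mem_singleton] at h; omega
    · have hst : stepB (u2i, i) u = (u2i, i) := by simp [stepB, hc]
      rw [hst]; exact ih _ _ hk hv hlt

-- the main loop correspondence
lemma loop_eq : ∀ (l : List String) (res : List Int) (u2i : PySem.Dict String Int) (i : Int),
    u2i.keys.Nodup → u2i.values.Nodup → (∀ v ∈ u2i.values, v < i) →
    l.foldl stepA (res, invD u2i, u2i, i) =
      (res ++ l.map (fun u => (l.foldl stepB (u2i, i)).1.getD u 0),
       invD (l.foldl stepB (u2i, i)).1,
       (l.foldl stepB (u2i, i)).1, (l.foldl stepB (u2i, i)).2) := by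
  intro l
  induction l with
  | nil => intro res u2i i _ _ _; simp
  | cons u l ih =>
    intro res u2i i hk hv hlt
    simp only [List.foldl_cons, List.map_cons]
    by_cases hc : u2i.contains u = false
    · -- fresh url
      have hstA : stepA (res, invD u2i, u2i, i) u
          = (res ++ [i], (invD u2i).insert i u, u2i.insert u i, i + 1) := by
        simp [stepA, hc]
      have hstB : stepB (u2i, i) u = (u2i.insert u i, i + 1) := by simp [stepB, hc]
      have hvals : (u2i.insert u i).values = u2i.values ++ [i] := by
        simp only [PySem.Dict.values, PySem.Dict.items_insert_of_not_contains _ _ hc,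
          List.map_append, List.map_cons, List.map_nil]
      have hv' : (u2i.insert u i).values.Nodup := by
        rw [hvals]
        refine List.Nodup.append hv (List.nodup_singleton i) ?_
        intro a ha hb
        simp only [List.mem_singleton] at hb
        have := hlt a ha; omega
      have hlt' : ∀ v ∈ (u2i.insert u i).values, v < i + 1 := by
        intro v hvv
        rw [hvals] at hvv
        rcases List.mem_append.mp hvv with h | h
        · have := hlt v h; omega
        · simp only [List.mem_singleton] at h; omega
      rw [hstA, hstB, invD_insert_fresh u2i u i hc hlt,
          ih (res ++ [i]) _ _ (PySem.Dict.nodup_keys_insert _ _ _ hk) hv' hlt']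
      have hu : (l.foldl stepB (u2i.insert u i, i + 1)).1.getD u 0 = i := by
        have hs := stB_get?_stable l (u2i.insert u i, i + 1) u i
          (PySem.Dict.get?_insert_self _ _ _)
        rw [PySem.Dict.getD_eq_get?_getD, hs]; rfl
      simp [hu]
    · -- repeated url
      have hc' : u2i.contains u = true := by simpa using hc
      have hsome : (u2i.get? u).isSome := by
        rw [← PySem.Dict.contains_eq_isSome_get?]; exact hc'
      obtain ⟨j, hget⟩ := Option.isSome_iff_exists.mp hsome
      have hgetD : u2i.getD u 0 = j := by
        rw [PySem.Dict.getD_eq_get?_getD, hget]; rfl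
      have hstA : stepA (res, invD u2i, u2i, i) u
          = (res ++ [j], (invD u2i).insert j u, u2i, i) := by
        simp [stepA, hc', hgetD]
      have hstB : stepB (u2i, i) u = (u2i, i) := by simp [stepB, hc']
      rw [hstA, hstB,
          invD_insert_mem u2i u j hv (PySem.Dict.mem_items_of_get?_eq_some _ hget),
          ih (res ++ [j]) _ _ hk hv hlt]
      have hu : (l.foldl stepB (u2i, i)).1.getD u 0 = j := by
        have hs := stB_get?_stable l (u2i, i) u j hget
        rw [PySem.Dict.getD_eq_get?_getD, hs]; rfl
      simp [hu]

theorem get_repeats_spec_aux (urls : List String) (starting : Int) :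
    get_repeats urls starting = get_repeats_alt urls starting := by
  unfold get_repeats get_repeats_alt
  have hvempty : (PySem.Dict.empty : PySem.Dict String Int).values = [] := rfl
  have h0 := loop_eq urls [] PySem.Dict.empty starting PySem.Dict.nodup_keys_empty
    (by rw [hvempty]; exact List.nodup_nil) (by rw [hvempty]; intro v hv; cases hv)
  have hinv : invD (PySem.Dict.empty : PySem.Dict String Int) = PySem.Dict.empty := rfl
  rw [hinv] at h0
  obtain ⟨hk, hv, -⟩ := stB_inv urls PySem.Dict.empty starting PySem.Dict.nodup_keys_empty
    (by rw [hvempty]; exact List.nodup_nil) (by rw [hvempty]; intro v hv; cases hv)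
  have hfresh := PySem.Dict.items_foldl_insert_fresh
    (urls.foldl stepB (PySem.Dict.empty, starting)).1.items
    (fun kv => kv.2) (fun kv => kv.1) (PySem.Dict.empty : PySem.Dict Int String)
    (by intro a _; simp [PySem.Dict.contains_empty])
    (by simpa only [PySem.Dict.values] using hv)
  simp only [h0, hfresh]
  simp [invD]
  rfl

-- ===== VERDICT (by name: the statement is the Claim_ definition above) =====
theorem get_repeats_spec : Claim_equal_get_repeats := by
  intro urls starting _
  exact get_repeats_spec_aux urls starting
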